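-- pv_equiv track=rewrite | github.com/GEORGIEOLOYE/TUNDE_PYTHON-ASSIGNMENT-1 | Tunde .py | generation_possible_abbreviations
-- ===== SOURCE A (Python) =====
-- def generation_possible_abbreviations(word):
--     abbreviations = []
--     # The code line below extracts the first letter of the word
--     first_letter = word[0]
--
--     # The code line below iterates over the indices of the word commencing from the second character
--     for i in range(1, len(word)):
--         # This code line Iterates over the indices following the current character
--         for j in range(i + 1, len(word)):
--             # The code line below creates a three-letter abbreviation applying the first letter with two other characters
--             abbreviation = first_letter + word[i] + word[j]
--
--             # The code line below helps to check if the abbreviation derived does not have any space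
--             if ' ' not in abbreviation:
--                 # The code line below helps to add the abbreviation to the list
--                 abbreviations.append(abbreviation)
--
--     return abbreviations
-- ===== SOURCE B (Python) =====
-- def generation_possible_abbreviations(word):
--     # first letter up front (empty word raises IndexError, like the original)
--     first_letter = word[0]
--     if first_letter == ' ':
--         return []
--     # single right-to-left pass: collect each character's block of abbreviations
--     # (built back-to-front) while maintaining the list of non-space characters
--     # to the right of the cursor; flatten the blocks once at the end
--     blocks = []
--     later = []
--     for c in reversed(word[1:]):
--         if c != ' ':
--             blocks = [[first_letter + c + d for d in later]] + blocks
--             later = [c] + later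
--     return [a for block in blocks for a in block]
-- ===== Notes on version B (the rewrite author's own statement) =====
-- stated objective: alternative
-- what changed: B replaces A's nested forward index loops with per-candidate space tests by a single right-to-left pass that builds the result back-to-front: it maintains a running list of the non-space characters already seen to the right, collects one block of abbreviations per non-space character, and flattens the blocks once at the end.
import Mathlib
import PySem

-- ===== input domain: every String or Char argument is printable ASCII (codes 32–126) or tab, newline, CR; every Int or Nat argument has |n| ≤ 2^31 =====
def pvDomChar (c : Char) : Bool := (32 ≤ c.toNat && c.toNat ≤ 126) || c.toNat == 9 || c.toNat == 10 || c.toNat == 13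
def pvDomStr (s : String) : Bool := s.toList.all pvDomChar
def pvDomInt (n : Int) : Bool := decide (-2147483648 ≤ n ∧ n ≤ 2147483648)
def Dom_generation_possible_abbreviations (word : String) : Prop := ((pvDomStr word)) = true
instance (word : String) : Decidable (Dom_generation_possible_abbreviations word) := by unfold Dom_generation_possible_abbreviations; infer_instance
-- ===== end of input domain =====

-- B makes a single right-to-left pass building the output back-to-front with a running
-- list of later non-space characters, instead of A's nested forward index loops
-- (objective: alternative single-pass decomposition of the same cost).

-- ===== PORT A =====
-- range(1, len(word)) and range(i+1, len(word)) have nonnegative bounds, so they are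
-- ported exactly as List.range' over Nat; word[i] with i in range is exactly cs.getD i ' ';
-- "' ' not in abbreviation" on the 3-character abbreviation is exactly char membership.
def generation_possible_abbreviations (word : String) : List String :=
  match word.toList with
  | [] => []  -- unreachable under Pre_: word[0] raises IndexError on the empty string
  | first :: _ =>
    (List.range' 1 (word.toList.length - 1)).foldl (fun acc i =>
      (List.range' (i + 1) (word.toList.length - (i + 1))).foldl (fun acc2 j =>
        if ' ' ∈ [first, word.toList.getD i ' ', word.toList.getD j ' '] then acc2
        else acc2 ++ [String.ofList [first, word.toList.getD i ' ', word.toList.getD j ' ']]) acc) []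

-- ===== PORT B =====
-- the reversed(word[1:]) loop of Source B: a foldl over tail.reverse carrying the state
-- (later, blocks); each non-space c prepends its block of abbreviations and joins
-- `later`; the final comprehension flattening the blocks is List.flatten.
def generation_possible_abbreviations_alt (word : String) : List String :=
  match word.toList with
  | [] => []  -- unreachable under Pre_: word[0] raises IndexError on the empty string
  | first :: tail =>
    if first = ' ' then []
    else
      (tail.reverse.foldl (fun s c =>
        if c ≠ ' ' then (c :: s.1, [s.1.map (fun d => String.ofList [first, c, d])] ++ s.2)
        else s) (([] : List Char), ([] : List (List String)))).2.flatten

-- ===== PRECONDITION & SPEC =====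
-- A raises IndexError on the empty string (word[0]); only "" is excluded.
def Pre_generation_possible_abbreviations (word : String) : Prop := word ≠ ""
instance (word : String) : Decidable (Pre_generation_possible_abbreviations word) := by unfold Pre_generation_possible_abbreviations; infer_instance
def pvWitness_generation_possible_abbreviations : String := "abc"
def Spec_generation_possible_abbreviations (word : String) (out : List String) : Prop := out = generation_possible_abbreviations_alt word
instance (word : String) (out : List String) : Decidable (Spec_generation_possible_abbreviations word out) := by unfold Spec_generation_possible_abbreviations; infer_instance

-- ===== CLAIM (what is proved, stated in full; the proofs are below) =====
def Claim_equal_generation_possible_abbreviations : Prop := ∀ (word : String), Dom_generation_possible_abbreviations word → Pre_generation_possible_abbreviations word → Spec_generation_possible_abbreviations word (generation_possible_abbreviations word)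

-- ===== LEMMAS AND PROOFS =====

-- head-vs-rest pairing over a character list (the common normal form of both ports)
def pvPairsB (first : Char) : List Char → List String
  | [] => []
  | c :: rest => rest.map (fun d => String.ofList [first, c, d]) ++ pvPairsB first rest

-- pairing where each character additionally pairs with a fixed trailing list `later`
def pvPairsW (first : Char) : List Char → List Char → List String
  | [], _ => []
  | c :: t, later => (t ++ later).map (fun d => String.ofList [first, c, d]) ++ pvPairsW first t later

-- fold over suffixes: the shape A's outer loop takes after eliminating indices
def pvSufFold (g : List String → Char → List Char → List String) : List Char → List String → List String
  | [], acc => acc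
  | c :: t, acc => pvSufFold g t (g acc c t)

-- an index loop whose body only uses the element at the index equals a fold over the dropped list
theorem pv_foldl_idx (g : List String → Char → List String) :
    ∀ (k s : Nat) (l : List Char) (acc : List String), k = l.length - s →
    (List.range' s k).foldl (fun a j => g a (l.getD j ' ')) acc = (l.drop s).foldl g acc := by
  intro k
  induction k with
  | zero =>
    intro s l acc h
    have : l.length ≤ s := by omega
    simp [List.drop_eq_nil_of_le this]
  | succ n ih =>
    intro s l acc h
    have hs : s < l.length := by omega
    rw [List.range'_succ, List.foldl_cons, ih (s + 1) l _ (by omega),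
        List.drop_eq_getElem_cons hs, List.foldl_cons, List.getD_eq_getElem l ' ' hs]

-- an index loop whose body uses the element at the index and the suffix after it
theorem pv_foldl_idx2 (g : List String → Char → List Char → List String) :
    ∀ (k s : Nat) (l : List Char) (acc : List String), k = l.length - s →
    (List.range' s k).foldl (fun a i => g a (l.getD i ' ') (l.drop (i + 1))) acc
      = pvSufFold g (l.drop s) acc := by
  intro k
  induction k with
  | zero =>
    intro s l acc h
    have : l.length ≤ s := by omega
    simp [List.drop_eq_nil_of_le this, pvSufFold]
  | succ n ih =>
    intro s l acc h
    have hs : s < l.length := by omega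
    rw [List.range'_succ, List.foldl_cons, ih (s + 1) l _ (by omega),
        List.drop_eq_getElem_cons hs, pvSufFold, List.getD_eq_getElem l ' ' hs]

-- A's inner loop over a suffix, with non-space first and current chars, appends the mapped filter
theorem pv_inner (first c : Char) (hf : first ≠ ' ') (hc : c ≠ ' ') :
    ∀ (t : List Char) (acc : List String),
    t.foldl (fun a2 d => if ' ' ∈ [first, c, d] then a2 else a2 ++ [String.ofList [first, c, d]]) acc
      = acc ++ (t.filter (fun d => d ≠ ' ')).map (fun d => String.ofList [first, c, d]) := by
  intro t
  induction t with
  | nil => intro acc; simp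
  | cons d t ih =>
    intro acc
    rw [List.foldl_cons]
    by_cases hd : d = ' '
    · rw [if_pos (by simp [hd]), ih, List.filter_cons_of_neg (by simp [hd])]
    · rw [if_neg (by simp [Ne.symm hf, Ne.symm hc, Ne.symm hd]), ih,
          List.filter_cons_of_pos (by simp [hd])]
      simp

-- A's inner loop contributes nothing when the current char is a space
theorem pv_inner_space (first : Char) :
    ∀ (t : List Char) (acc : List String),
    t.foldl (fun a2 d => if ' ' ∈ [first, ' ', d] then a2 else a2 ++ [String.ofList [first, ' ', d]]) acc
      = acc := by
  intro t
  induction t with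
  | nil => intro acc; rfl
  | cons d t ih => intro acc; rw [List.foldl_cons, if_pos (by simp)]; exact ih acc

-- A's inner loop contributes nothing when the first letter is a space
theorem pv_inner_first_space (c : Char) :
    ∀ (t : List Char) (acc : List String),
    t.foldl (fun a2 d => if ' ' ∈ [' ', c, d] then a2 else a2 ++ [String.ofList [' ', c, d]]) acc
      = acc := by
  intro t
  induction t with
  | nil => intro acc; rfl
  | cons d t ih => intro acc; rw [List.foldl_cons, if_pos (by simp)]; exact ih acc

-- the suffix fold with A's simplified body equals head-vs-rest pairing over the filtered list
theorem pv_suffold_pairs (first : Char) :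
    ∀ (l : List Char) (acc : List String),
    pvSufFold (fun a c t => if c = ' ' then a
        else a ++ (t.filter (fun d => d ≠ ' ')).map (fun d => String.ofList [first, c, d])) l acc
      = acc ++ pvPairsB first (l.filter (fun c => c ≠ ' ')) := by
  intro l
  induction l with
  | nil => intro acc; simp [pvSufFold, pvPairsB]
  | cons c t ih =>
    intro acc
    by_cases hc : c = ' '
    · subst hc
      simp only [pvSufFold, List.filter_cons]
      simpa using ih acc
    · simp only [pvSufFold, if_neg hc, List.filter_cons]
      rw [ih]
      simp [hc, pvPairsB]

-- the suffix fold is constant when the first letter is a space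
theorem pv_suffold_space :
    ∀ (l : List Char) (acc : List String),
    pvSufFold (fun a _ _ => a) l acc = acc := by
  intro l
  induction l with
  | nil => intro acc; rfl
  | cons c t ih => intro acc; exact ih acc

-- the whole nested loop of A, in list form, in terms of head-vs-rest pairing
theorem pv_main (first : Char) (tail : List Char) :
    (List.range' 1 ((first :: tail).length - 1)).foldl (fun acc i =>
      (List.range' (i + 1) ((first :: tail).length - (i + 1))).foldl (fun acc2 j =>
        if ' ' ∈ [first, (first :: tail).getD i ' ', (first :: tail).getD j ' '] then acc2
        else acc2 ++ [String.ofList [first, (first :: tail).getD i ' ', (first :: tail).getD j ' ']]) acc) []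
      = if first = ' ' then [] else pvPairsB first (tail.filter (fun c => c ≠ ' ')) := by
  have hout : (fun (acc : List String) (i : Nat) =>
      (List.range' (i + 1) ((first :: tail).length - (i + 1))).foldl (fun acc2 j =>
        if ' ' ∈ [first, (first :: tail).getD i ' ', (first :: tail).getD j ' '] then acc2
        else acc2 ++ [String.ofList [first, (first :: tail).getD i ' ', (first :: tail).getD j ' ']]) acc)
      = (fun acc i =>
        (fun (a : List String) (c : Char) (t : List Char) =>
          t.foldl (fun a2 d => if ' ' ∈ [first, c, d] then a2
            else a2 ++ [String.ofList [first, c, d]]) a) acc ((first :: tail).getD i ' ')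
          ((first :: tail).drop (i + 1))) := by
    funext acc i
    exact pv_foldl_idx
      (fun a2 d => if ' ' ∈ [first, (first :: tail).getD i ' ', d] then a2
        else a2 ++ [String.ofList [first, (first :: tail).getD i ' ', d]])
      ((first :: tail).length - (i + 1)) (i + 1) (first :: tail) acc rfl
  rw [hout]
  refine (pv_foldl_idx2
      (fun (a : List String) (c : Char) (t : List Char) =>
        t.foldl (fun a2 d => if ' ' ∈ [first, c, d] then a2
          else a2 ++ [String.ofList [first, c, d]]) a)
      ((first :: tail).length - 1) 1 (first :: tail) [] (by simp)).trans ?_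
  show pvSufFold _ tail [] = _
  by_cases hf : first = ' '
  · subst hf
    rw [if_pos rfl]
    have hg : (fun (a : List String) (c : Char) (t : List Char) =>
        t.foldl (fun a2 d => if ' ' ∈ [' ', c, d] then a2
          else a2 ++ [String.ofList [' ', c, d]]) a) = fun a _ _ => a := by
      funext a c t
      exact pv_inner_first_space c t a
    rw [hg, pv_suffold_space]
  · rw [if_neg hf]
    have hg : (fun (a : List String) (c : Char) (t : List Char) =>
        t.foldl (fun a2 d => if ' ' ∈ [first, c, d] then a2
          else a2 ++ [String.ofList [first, c, d]]) a)
        = fun a c t => if c = ' ' then a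
            else a ++ (t.filter (fun d => d ≠ ' ')).map (fun d => String.ofList [first, c, d]) := by
      funext a c t
      by_cases hc : c = ' '
      · subst hc; rw [if_pos rfl]; exact pv_inner_space first t a
      · rw [if_neg hc]; exact pv_inner first c hf hc t a
    rw [hg, pv_suffold_pairs]
    simp

-- pairing with an empty trailing list is head-vs-rest pairing
theorem pvPairsW_nil (first : Char) :
    ∀ (v : List Char), pvPairsW first v [] = pvPairsB first v := by
  intro v
  induction v with
  | nil => rfl
  | cons c t ih => simp [pvPairsW, pvPairsB, ih]

-- the block list B accumulates, one block per non-space character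
def pvBlocksW (first : Char) : List Char → List Char → List (List String)
  | [], _ => []
  | c :: t, later => (t ++ later).map (fun d => String.ofList [first, c, d]) :: pvBlocksW first t later

-- flattening the block list gives the pairing with `later`
theorem pvBlocksW_flatten (first : Char) :
    ∀ (v later : List Char), (pvBlocksW first v later).flatten = pvPairsW first v later := by
  intro v
  induction v with
  | nil => intro later; rfl
  | cons c t ih => intro later; simp [pvBlocksW, pvPairsW, ih]

-- B's right-to-left fold computes the filtered list and the block list
theorem pv_foldB (first : Char) :
    ∀ (l later : List Char) (blocks : List (List String)),
    l.foldr (fun c s =>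
        if c ≠ ' ' then (c :: s.1, [s.1.map (fun d => String.ofList [first, c, d])] ++ s.2)
        else s) (later, blocks)
      = (l.filter (fun c => c ≠ ' ') ++ later,
         pvBlocksW first (l.filter (fun c => c ≠ ' ')) later ++ blocks) := by
  intro l
  induction l with
  | nil => intro later blocks; simp [pvBlocksW]
  | cons c t ih =>
    intro later blocks
    rw [List.foldr_cons, ih later blocks]
    by_cases hc : c = ' '
    · subst hc
      simp
    · simp [hc, pvBlocksW]

-- ===== VERDICT (by name: the statement is the Claim_ definition above) =====
theorem generation_possible_abbreviations_spec : Claim_equal_generation_possible_abbreviations := by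
  intro word _ hpre
  unfold Spec_generation_possible_abbreviations
  unfold generation_possible_abbreviations generation_possible_abbreviations_alt
  cases hcs : word.toList with
  | nil =>
    exact absurd (String.toList_eq_nil_iff.mp hcs) hpre
  | cons first tail =>
    dsimp only
    rw [List.foldl_reverse, pv_foldB first tail [] []]
    by_cases hf : first = ' '
    · rw [pv_main first tail]
      simp [hf]
    · rw [if_neg hf]
      simp only [List.append_nil]
      rw [pvBlocksW_flatten, pvPairsW_nil]
      simpa [hf] using pv_main first tail
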